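-- pv_equiv track=rewrite | github.com/itsdavidmandal/dnaanalyser | main.py | find_motifs
-- ===== SOURCE A (Python) =====
-- def find_motifs(sequence, motifs):
--     """
--     Finds motifs (subsequences) in a DNA sequence.
--     Returns a list of starting indices of the motif matches.
--     """
--     matches = []
--
--     for motif in motifs:
--         pattern_length = len(motif)
--         sequence_length = len(sequence)
--
--         for i in range(sequence_length - pattern_length + 1):
--             if sequence[i:i + pattern_length] == motif:
--                 matches.append(i)
--
--     return matches
-- ===== SOURCE B (Python) =====
-- def _occurrences(sequence, motif):
--     hits = []
--     start = 0
--     while start <= len(sequence):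
--         j = sequence.find(motif, start)
--         if j == -1:
--             break
--         hits.append(j)
--         start = j + 1
--     return hits
--
--
-- def find_motifs(sequence, motifs):
--     matches = []
--     for motif in motifs:
--         matches += _occurrences(sequence, motif)
--     return matches
-- ===== Notes on version B (the rewrite author's own statement) =====
-- stated objective: faster
-- what changed: Instead of comparing a fresh slice sequence[i:i+m] against the motif at every index i, B repeatedly calls sequence.find(motif, start), jumping straight from one occurrence to the next with the C-level substring search.
import Mathlib
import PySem

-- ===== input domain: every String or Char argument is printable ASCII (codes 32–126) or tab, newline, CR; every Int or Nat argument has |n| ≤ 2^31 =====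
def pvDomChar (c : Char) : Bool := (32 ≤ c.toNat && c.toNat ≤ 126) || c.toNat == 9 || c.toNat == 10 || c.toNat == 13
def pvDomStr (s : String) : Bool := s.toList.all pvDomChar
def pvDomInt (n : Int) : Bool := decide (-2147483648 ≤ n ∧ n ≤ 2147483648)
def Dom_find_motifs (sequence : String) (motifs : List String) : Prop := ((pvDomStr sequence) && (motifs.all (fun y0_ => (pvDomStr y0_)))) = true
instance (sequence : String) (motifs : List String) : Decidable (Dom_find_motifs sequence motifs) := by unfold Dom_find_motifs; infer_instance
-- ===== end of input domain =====

-- B replaces A's per-index Python slice comparison with a loop over the library substring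
-- search (str.find with a start offset), jumping from one occurrence to the next; objective: faster (constant-factor).


-- ===== PORT A =====
-- for motif in motifs: for i in range(len(sequence) - len(motif) + 1): if sequence[i:i+len(motif)] == motif: outL.append(i)
def find_motifs (sequence : String) (motifs : List String) : List Int :=
  motifs.foldl (fun outL motif =>
    let pattern_length := PySem.Str.len motif
    let sequence_length := PySem.Str.len sequence
    (PySem.List.pyRange 0 (sequence_length - pattern_length + 1)).foldl
      (fun outL i =>
        if PySem.Str.slice sequence (some i) (some (i + pattern_length)) == motif
        then outL ++ [i] else outL)
      outL) []

-- ===== PORT B =====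
-- the 'while start <= len(sequence): j = sequence.find(motif, start); …; start = j + 1' loop of Source B
def pvOccLoop (sequence motif : String) (start : Nat) : List Int :=
  if h : start ≤ sequence.toList.length then
    if hj : PySem.Str.findFrom sequence motif (start : Int) = -1 then []
    else PySem.Str.findFrom sequence motif (start : Int) ::
         pvOccLoop sequence motif ((PySem.Str.findFrom sequence motif (start : Int)).toNat + 1)
  else []
termination_by sequence.toList.length + 1 - start
decreasing_by
  have h1 := (PySem.Chars.findFrom_natCast_spec sequence.toList motif.toList start h
    (by simpa [PySem.Str.findFrom_eq] using hj)).1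
  simp only [PySem.Str.findFrom_eq]
  omega

def find_motifs_alt (sequence : String) (motifs : List String) : List Int :=
  motifs.foldl (fun outL motif => outL ++ pvOccLoop sequence motif 0) []

-- ===== PRECONDITION & SPEC =====
def Spec_find_motifs (sequence : String) (motifs : List String) (out : List Int) : Prop := out = find_motifs_alt sequence motifs
instance (sequence : String) (motifs : List String) (out : List Int) : Decidable (Spec_find_motifs sequence motifs out) := by unfold Spec_find_motifs; infer_instance

-- ===== CLAIM (what is proved, stated in full; the proofs are below) =====
def Claim_equal_find_motifs : Prop := ∀ (sequence : String) (motifs : List String), Dom_find_motifs sequence motifs → Spec_find_motifs sequence motifs (find_motifs sequence motifs)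

-- ===== LEMMAS AND PROOFS =====

def pvMatches (s m : String) : List Int :=
  ((List.range' 0 (s.toList.length + 1)).filter
    (fun i => decide (m.toList <+: s.toList.drop i))).map (fun i => (i : Int))

-- prefix at i ≥ k implies infix of drop k
lemma pref_infix (L M : List Char) (k i : Nat) (hk : k ≤ i) (h : M <+: L.drop i) :
    M <:+: L.drop k := by
  have hd : L.drop i = (L.drop k).drop (i - k) := by
    rw [List.drop_drop]; congr 1; omega
  rw [hd] at h
  exact h.isInfix.trans (List.drop_suffix _ _).isInfix

lemma pvOccLoop_eq (s m : String) (start : Nat) :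
    pvOccLoop s m start
      = ((List.range' start (s.toList.length + 1 - start)).filter
          (fun i => decide (m.toList <+: s.toList.drop i))).map (fun i => (i : Int)) := by
  induction start using pvOccLoop.induct (sequence := s) (motif := m) with
  | case1 start h hj =>
    rw [pvOccLoop, dif_pos h, dif_pos hj]
    have hnin : ¬ m.toList <:+: s.toList.drop start :=
      (PySem.Chars.findFrom_natCast_eq_neg_one_iff s.toList m.toList start h).mp
        (by simpa [PySem.Str.findFrom_eq] using hj)
    have hz : ((List.range' start (s.toList.length + 1 - start)).filter
          (fun i => decide (m.toList <+: s.toList.drop i))) = [] := by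
      rw [List.filter_eq_nil_iff]
      intro i hi
      rw [List.mem_range'_1] at hi
      simp only [decide_eq_true_eq]
      exact fun hp => hnin (pref_infix _ _ _ _ hi.1 hp)
    rw [hz]; rfl
  | case2 start h hj ih =>
    rw [pvOccLoop, dif_pos h, dif_neg hj]
    have hj' : PySem.Chars.findFrom s.toList m.toList (start : Int) ≠ -1 := by
      simpa [PySem.Str.findFrom_eq] using hj
    obtain ⟨h1, h2, h3⟩ := PySem.Chars.findFrom_natCast_spec s.toList m.toList start h hj'
    set j := PySem.Chars.findFrom s.toList m.toList (start : Int) with hjdef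
    have hjs : PySem.Str.findFrom s m (start : Int) = j := PySem.Str.findFrom_eq s m _ none
    have hjn : j = ((j.toNat : Nat) : Int) := by omega
    have hjle : j.toNat ≤ s.toList.length := by
      have hfl := PySem.Chars.findFrom_natCast s.toList m.toList start h
      rw [← hjdef] at hfl
      have hle := PySem.Chars.find_le_length (s.toList.drop start) m.toList
      rw [List.length_drop] at hle
      rcases eq_or_ne (PySem.Chars.find (s.toList.drop start) m.toList) (-1) with hc | hc
      · rw [if_pos hc] at hfl; exact absurd hfl hj'
      · rw [if_neg hc] at hfl; omega
    have hsj : start ≤ j.toNat := by omega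
    rw [hjs] at ih ⊢
    rw [ih]
    have hsplit : List.range' start (s.toList.length + 1 - start)
        = List.range' start (j.toNat - start) ++ List.range' j.toNat (s.toList.length + 1 - j.toNat) := by
      have hr := List.range'_append (s := start) (m := j.toNat - start)
        (n := s.toList.length + 1 - j.toNat) (step := 1)
      have e1 : start + 1 * (j.toNat - start) = j.toNat := by omega
      have e2 : j.toNat - start + (s.toList.length + 1 - j.toNat) = s.toList.length + 1 - start := by omega
      rw [e1, e2] at hr
      exact hr.symm
    rw [hsplit, List.filter_append]
    have hnil : (List.range' start (j.toNat - start)).filter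
        (fun i => decide (m.toList <+: s.toList.drop i)) = [] := by
      rw [List.filter_eq_nil_iff]
      intro i hi
      rw [List.mem_range'_1] at hi
      simp only [decide_eq_true_eq]
      exact h3 i hi.1 (by omega)
    rw [hnil, List.nil_append]
    have hc : s.toList.length + 1 - j.toNat = (s.toList.length - j.toNat) + 1 := by omega
    rw [hc, List.range'_succ, List.filter_cons]
    have ht : (decide (m.toList <+: s.toList.drop j.toNat)) = true := by
      simpa using h2
    rw [ht]
    rw [show s.toList.length + 1 - (j.toNat + 1) = s.toList.length - j.toNat from by omega]
    simp [← hjn]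
  | case3 start h =>
    rw [pvOccLoop, dif_neg h]
    have hz : s.toList.length + 1 - start = 0 := by omega
    rw [hz]; rfl

lemma cond_eq (s m : String) (k : Nat) :
    (PySem.Str.slice s (some (k : Int)) (some ((k : Int) + PySem.Str.len m)) == m)
      = decide (m.toList <+: s.toList.drop k) := by
  have hs : (PySem.Str.slice s (some (k : Int)) (some ((k : Int) + PySem.Str.len m))).toList
      = (s.toList.drop k).take m.toList.length := by
    simp [PySem.Str.slice, PySem.Str.len_eq, PySem.List.slice_natCast_add]
  rw [Bool.eq_iff_iff]
  simp only [beq_iff_eq, decide_eq_true_eq]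
  rw [String.ext_iff, hs, List.prefix_iff_eq_take]
  exact eq_comm

lemma scan_eq (s m : String) (acc : List Int) :
    (PySem.List.pyRange 0 (PySem.Str.len s - PySem.Str.len m + 1)).foldl
      (fun outL i =>
        if PySem.Str.slice s (some i) (some (i + PySem.Str.len m)) == m
        then outL ++ [i] else outL) acc
      = acc ++ pvMatches s m := by
  rcases Nat.lt_or_ge s.toList.length m.toList.length with hpn | hpn
  · have hb : PySem.Str.len s - PySem.Str.len m + 1 ≤ 0 := by
      simp only [PySem.Str.len_eq]; omega
    rw [PySem.List.pyRange_one_eq_nil hb]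
    simp only [List.foldl_nil]
    have hz0 : List.filter (fun i => decide (m.toList <+: s.toList.drop i))
        (List.range' 0 (s.toList.length + 1)) = [] := by
      rw [List.filter_eq_nil_iff]
      intro i _
      simp only [decide_eq_true_eq]
      intro hp
      have hl := hp.length_le
      rw [List.length_drop] at hl
      omega
    unfold pvMatches
    rw [hz0]
    simp
  · have hb : PySem.Str.len s - PySem.Str.len m + 1
        = ((s.toList.length - m.toList.length + 1 : Nat) : Int) := by
      simp only [PySem.Str.len_eq]; omega
    rw [hb, PySem.List.pyRange_one]
    simp only [zero_add, Int.sub_zero, Int.toNat_natCast]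
    rw [PySem.List.foldl_append_if_eq_filter]
    congr 1
    rw [List.filter_map]
    have hfl : List.filter
        ((fun i => PySem.Str.slice s (some i) (some (i + PySem.Str.len m)) == m) ∘ (fun k : Nat => (k : Int)))
        (List.range (s.toList.length - m.toList.length + 1))
        = List.filter (fun i => decide (m.toList <+: s.toList.drop i))
            (List.range (s.toList.length - m.toList.length + 1)) := by
      apply List.filter_congr
      intro k _
      exact cond_eq s m k
    rw [hfl]
    have hsplit : List.range' 0 (s.toList.length + 1)
        = List.range' 0 (s.toList.length - m.toList.length + 1)
          ++ List.range' (s.toList.length - m.toList.length + 1)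
              (s.toList.length + 1 - (s.toList.length - m.toList.length + 1)) := by
      have hr := List.range'_append (s := 0) (m := s.toList.length - m.toList.length + 1)
        (n := s.toList.length + 1 - (s.toList.length - m.toList.length + 1)) (step := 1)
      have e1 : 0 + 1 * (s.toList.length - m.toList.length + 1)
          = s.toList.length - m.toList.length + 1 := by omega
      have e2 : s.toList.length - m.toList.length + 1
            + (s.toList.length + 1 - (s.toList.length - m.toList.length + 1))
          = s.toList.length + 1 := by omega
      rw [e1, e2] at hr
      exact hr.symm
    have hnil : List.filter (fun i => decide (m.toList <+: s.toList.drop i))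
        (List.range' (s.toList.length - m.toList.length + 1)
          (s.toList.length + 1 - (s.toList.length - m.toList.length + 1))) = [] := by
      rw [List.filter_eq_nil_iff]
      intro i hi
      rw [List.mem_range'_1] at hi
      simp only [decide_eq_true_eq]
      intro hp
      have hl := hp.length_le
      rw [List.length_drop] at hl
      omega
    unfold pvMatches
    rw [hsplit, List.filter_append, hnil, List.append_nil, List.range_eq_range']
    simp
    exact List.map_eq_flatMap

-- ===== VERDICT (by name: the statement is the Claim_ definition above) =====
theorem find_motifs_spec : Claim_equal_find_motifs := by
  intro sequence motifs _
  unfold Spec_find_motifs find_motifs find_motifs_alt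
  refine PySem.List.foldl_congr_mem _ _ _ _ ?_
  intro acc motif _
  rw [scan_eq, pvOccLoop_eq]
  unfold pvMatches
  simp
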